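-- pv_equiv track=rewrite | github.com/xcombelle/sgftool | sgfpattern.py | goban_to_string
-- ===== SOURCE A (Python) =====
-- def goban_to_string(goban, size):
--     result=[]
--     for x in range(-1,size+1):
--         for y in range(-1, size+1):
--             if not (0<=x and x<size and 0<=y and y<size):
--                 result.append('#')
--             else:
--                 result.append(goban[x][y])
--     return "".join(result)
-- ===== SOURCE B (Python) =====
-- def goban_to_string(goban, size):
--     border = '#' * (size + 2)
--     rows = [border]
--     for x in range(size):
--         rows.append(''.join(['#'] + goban[x][:size] + ['#']))
--     rows.append(border)
--     return ''.join(rows)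
-- ===== Notes on version B (the rewrite author's own statement) =====
-- stated objective: simpler
-- what changed: Replaces the per-cell boundary conditional inside a nested -1..size loop with row-by-row construction: a precomputed border line, one joined slice per interior row, and a final join.
-- outside the precondition, e.g. on goban_to_string([], -1): A returns '#', B returns '##'
import Mathlib
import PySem

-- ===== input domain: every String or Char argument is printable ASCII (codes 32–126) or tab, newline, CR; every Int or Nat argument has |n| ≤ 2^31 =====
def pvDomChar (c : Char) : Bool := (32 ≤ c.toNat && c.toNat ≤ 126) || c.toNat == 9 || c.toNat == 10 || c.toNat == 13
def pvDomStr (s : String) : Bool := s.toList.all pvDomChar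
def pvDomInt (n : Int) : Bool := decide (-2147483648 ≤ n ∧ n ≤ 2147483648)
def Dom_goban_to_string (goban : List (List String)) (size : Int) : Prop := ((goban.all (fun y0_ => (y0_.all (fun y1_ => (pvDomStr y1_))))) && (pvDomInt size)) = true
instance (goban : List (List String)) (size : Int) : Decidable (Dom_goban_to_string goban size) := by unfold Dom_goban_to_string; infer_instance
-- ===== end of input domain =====

-- B builds the output row-by-row (a precomputed border line, then '#'+row+'#' per interior
-- row) instead of A's per-cell boundary conditional inside a nested loop over -1..size; objective: simpler.


-- ===== PORT A =====
def goban_to_string (goban : List (List String)) (size : Int) : String :=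
  let result : List String :=
    (PySem.List.pyRange (-1) (size+1) 1).foldl (fun res x =>
      (PySem.List.pyRange (-1) (size+1) 1).foldl (fun res y =>
        if ¬ (0 ≤ x ∧ x < size ∧ 0 ≤ y ∧ y < size) then
          res ++ ["#"]
        else
          res ++ [PySem.List.pyGetD (PySem.List.pyGetD goban x []) y ""]) res) []
  PySem.Str.join "" result

def goban_to_string_alt (goban : List (List String)) (size : Int) : String :=
  let border : String := String.ofList (PySem.List.pyRepeat ['#'] (size + 2))
  let rows : List String :=
    (PySem.List.pyRange 0 size 1).foldl (fun rows x =>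
      rows ++ [PySem.Str.join "" (["#"] ++ PySem.List.slice (PySem.List.pyGetD goban x []) none (some size) ++ ["#"])])
      [border]
  PySem.Str.join "" (rows ++ [border])

-- ===== PRECONDITION & SPEC =====
-- Pre_ excludes inputs where A raises IndexError (0 < size but goban or an interior row shorter
-- than size), and the degenerate size = -1, where A's border loop emits a single accidental '#'.
def Pre_goban_to_string (goban : List (List String)) (size : Int) : Prop :=
  size ≤ -2 ∨ (0 ≤ size ∧ size ≤ goban.length ∧ ∀ row ∈ goban.take size.toNat, size ≤ row.length)
instance (goban : List (List String)) (size : Int) : Decidable (Pre_goban_to_string goban size) := by unfold Pre_goban_to_string; infer_instance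
def pvWitness_goban_to_string : List (List String) × Int := ([["o", "."], [".", "x"]], 2)

def Spec_goban_to_string (goban : List (List String)) (size : Int) (out : String) : Prop := out = goban_to_string_alt goban size
instance (goban : List (List String)) (size : Int) (out : String) : Decidable (Spec_goban_to_string goban size out) := by unfold Spec_goban_to_string; infer_instance

-- ===== CLAIM (what is proved, stated in full; the proofs are below) =====
def Claim_equal_goban_to_string : Prop := ∀ (goban : List (List String)) (size : Int), Dom_goban_to_string goban size → Pre_goban_to_string goban size → Spec_goban_to_string goban size (goban_to_string goban size)

-- ===== LEMMAS AND PROOFS =====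
lemma join_empty_sep (L : List (List Char)) : PySem.Chars.join [] L = L.flatten := by
  induction L with
  | nil => simp [PySem.Chars.join_nil]
  | cons a t ih =>
    cases t with
    | nil => simp [PySem.Chars.join_singleton]
    | cons b r => rw [PySem.Chars.join_cons_cons]; simp at ih ⊢; simpa using ih

lemma flatten_flatMap' {α : Type} (g : α → List (List Char)) (l : List α) :
    (l.flatMap g).flatten = (l.map (fun x => (g x).flatten)).flatten := by
  induction l with
  | nil => rfl
  | cons a t ih => simp [List.flatMap_cons, ih]

lemma row_take (row : List String) (n : Nat) (h : n ≤ row.length) :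
    (PySem.List.pyRange 0 (n:Int)).map (fun y => PySem.List.pyGetD row y "") = row.take n := by
  rw [PySem.List.pyRange_zero_natCast, List.map_map]
  apply List.ext_getElem
  · simp [min_eq_left h]
  · intro i h1 h2
    simp only [List.getElem_map, List.getElem_range, Function.comp_apply, List.getElem_take]
    rw [PySem.List.pyGetD_natCast]
    simp at h1
    rw [List.getD_eq_getElem row "" (by omega)]

lemma goban_to_string_eq_alt (goban : List (List String)) (size : Int)
    (h0 : 0 ≤ size) (hlen : size ≤ goban.length)
    (hrows : ∀ row ∈ goban.take size.toNat, size ≤ row.length) :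
    goban_to_string goban size = goban_to_string_alt goban size := by
  obtain ⟨n, hs⟩ := Int.le.dest h0
  simp only [zero_add] at hs
  subst hs
  unfold goban_to_string goban_to_string_alt
  have hinner : ∀ (x : Int) (res : List String),
      (PySem.List.pyRange (-1) ((n:Int)+1)).foldl (fun res y =>
        if ¬ (0 ≤ x ∧ x < (n:Int) ∧ 0 ≤ y ∧ y < (n:Int)) then res ++ ["#"]
        else res ++ [PySem.List.pyGetD (PySem.List.pyGetD goban x []) y ""]) res
      = res ++ (PySem.List.pyRange (-1) ((n:Int)+1)).map (fun y =>
          if ¬ (0 ≤ x ∧ x < (n:Int) ∧ 0 ≤ y ∧ y < (n:Int)) then "#"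
          else PySem.List.pyGetD (PySem.List.pyGetD goban x []) y "") := by
    intro x res
    have hf : (fun (res : List String) y =>
        if ¬ (0 ≤ x ∧ x < (n:Int) ∧ 0 ≤ y ∧ y < (n:Int)) then res ++ ["#"]
        else res ++ [PySem.List.pyGetD (PySem.List.pyGetD goban x []) y ""])
      = (fun res y => res ++ [if ¬ (0 ≤ x ∧ x < (n:Int) ∧ 0 ≤ y ∧ y < (n:Int)) then "#"
        else PySem.List.pyGetD (PySem.List.pyGetD goban x []) y ""]) := by
      funext res y; split_ifs <;> rfl
    rw [hf, PySem.List.foldl_append_singleton_eq_map]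
  simp only [hinner]
  rw [PySem.List.foldl_append_eq_flatMap, PySem.List.foldl_append_singleton_eq_map]
  apply String.toList_inj.mp
  have hempty : ("" : String).toList = ([] : List Char) := rfl
  simp only [PySem.Str.toList_join, hempty, join_empty_sep, List.nil_append]
  rw [List.map_flatMap, flatten_flatMap']
  simp only [List.map_map, Function.comp_def]
  have hborder : (String.ofList (PySem.List.pyRepeat ['#'] ((n:Int) + 2))).toList
      = List.replicate (n+2) '#' := by
    rw [PySem.List.pyRepeat_singleton]
    simp
    omega
  have hR : PySem.List.pyRange (-1) ((n:Int)+1) = (-1) :: (PySem.List.pyRange 0 (n:Int) ++ [(n:Int)]) := by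
    rw [PySem.List.pyRange_one_cons (by omega : (-1:Int) < (n:Int)+1)]
    norm_num
    exact PySem.List.pyRange_one_succ_right (by omega : (0:Int) ≤ (n:Int))
  have hbrow : ∀ x : Int, (x < 0 ∨ (n:Int) ≤ x) →
      ((PySem.List.pyRange (-1) ((n:Int)+1)).map (fun y =>
          (if ¬ (0 ≤ x ∧ x < (n:Int) ∧ 0 ≤ y ∧ y < (n:Int)) then "#"
          else PySem.List.pyGetD (PySem.List.pyGetD goban x []) y "").toList)).flatten
      = List.replicate (n+2) '#' := by
    intro x hx
    have hcongr : ∀ y ∈ PySem.List.pyRange (-1) ((n:Int)+1),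
        (if ¬ (0 ≤ x ∧ x < (n:Int) ∧ 0 ≤ y ∧ y < (n:Int)) then "#"
          else PySem.List.pyGetD (PySem.List.pyGetD goban x []) y "").toList = ['#'] := by
      intro y _
      rw [if_pos (by omega)]
      rfl
    rw [List.map_congr_left hcongr, List.map_const', List.flatten_replicate_singleton,
      PySem.List.length_pyRange_one, show ((n:Int)+1 - -1).toNat = n+2 from by omega]
  have hirow : ∀ x ∈ PySem.List.pyRange 0 (n:Int),
      ((PySem.List.pyRange (-1) ((n:Int)+1)).map (fun y =>
          (if ¬ (0 ≤ x ∧ x < (n:Int) ∧ 0 ≤ y ∧ y < (n:Int)) then "#"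
          else PySem.List.pyGetD (PySem.List.pyGetD goban x []) y "").toList)).flatten
      = (PySem.Str.join "" (["#"] ++ PySem.List.slice (PySem.List.pyGetD goban x []) none (some (n:Int)) ++ ["#"])).toList := by
    intro x hx
    rw [PySem.List.mem_pyRange_one] at hx
    have hrlen : n ≤ (PySem.List.pyGetD goban x []).length := by
      obtain ⟨k, hk⟩ := Int.le.dest hx.1
      simp only [zero_add] at hk
      have hkn : k < n := by omega
      have hklen : k < goban.length := by omega
      have hmem : goban[k] ∈ goban.take n := by
        have h1 : (goban.take n)[k]'(by simp; omega) = goban[k] := List.getElem_take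
        rw [← h1]; exact List.getElem_mem _
      have h2 := hrows goban[k] (by simpa using hmem)
      have hrowk : PySem.List.pyGetD goban x [] = goban[k] := by
        rw [← hk, PySem.List.pyGetD_natCast, List.getD_eq_getElem goban [] hklen]
      rw [hrowk]; omega
    rw [PySem.Str.toList_join]
    have hempty : ("" : String).toList = ([] : List Char) := rfl
    rw [hempty, join_empty_sep]
    rw [PySem.List.slice_to (PySem.List.pyGetD goban x []) (by omega : (0:Int) ≤ (n:Int))]
    have htn : ((n:Int)).toNat = n := by omega
    rw [htn]
    have hmid : ∀ y ∈ PySem.List.pyRange 0 (n:Int),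
        (if ¬ (0 ≤ x ∧ x < (n:Int) ∧ 0 ≤ y ∧ y < (n:Int)) then "#"
          else PySem.List.pyGetD (PySem.List.pyGetD goban x []) y "").toList
        = (PySem.List.pyGetD (PySem.List.pyGetD goban x []) y "").toList := by
      intro y hy
      rw [PySem.List.mem_pyRange_one] at hy
      rw [if_neg (by omega)]
    have hmaps : (PySem.List.pyRange 0 (n:Int)).map (fun y =>
          (PySem.List.pyGetD (PySem.List.pyGetD goban x []) y "").toList)
        = ((PySem.List.pyGetD goban x []).take n).map String.toList := by
      rw [show (fun y => (PySem.List.pyGetD (PySem.List.pyGetD goban x []) y "").toList)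
            = (String.toList ∘ fun y => PySem.List.pyGetD (PySem.List.pyGetD goban x []) y "") from rfl,
        ← List.map_map, row_take (PySem.List.pyGetD goban x []) n hrlen]
    rw [hR]
    simp only [List.map_cons, List.map_append, List.map_nil, List.flatten_cons, List.flatten_append,
      List.map_congr_left hmid, hmaps]
    rw [if_pos (by omega : ¬ (0 ≤ x ∧ x < (n:Int) ∧ 0 ≤ (-1:Int) ∧ (-1:Int) < (n:Int))),
      if_pos (by omega : ¬ (0 ≤ x ∧ x < (n:Int) ∧ 0 ≤ (n:Int) ∧ (n:Int) < (n:Int)))]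
    simp
  -- assemble
  set F := fun x : Int => ((PySem.List.pyRange (-1) ((n:Int)+1)).map (fun y =>
      (if ¬ (0 ≤ x ∧ x < (n:Int) ∧ 0 ≤ y ∧ y < (n:Int)) then "#"
      else PySem.List.pyGetD (PySem.List.pyGetD goban x []) y "").toList)).flatten with hF
  have hFb : ∀ x : Int, (x < 0 ∨ (n:Int) ≤ x) → F x = List.replicate (n+2) '#' := hbrow
  have hFi : ∀ x ∈ PySem.List.pyRange 0 (n:Int), F x
      = (PySem.Str.join "" (["#"] ++ PySem.List.slice (PySem.List.pyGetD goban x []) none (some (n:Int)) ++ ["#"])).toList := hirow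
  rw [hR]
  simp only [List.map_cons, List.map_append, List.map_nil, List.flatten_cons, List.flatten_append,
    List.map_congr_left hFi, hFb (-1) (by omega), hFb (n:Int) (by omega), hborder]
  simp [List.map_map, Function.comp_def]

lemma goban_to_string_eq_alt_neg (goban : List (List String)) (size : Int) (h : size ≤ -2) :
    goban_to_string goban size = goban_to_string_alt goban size := by
  unfold goban_to_string goban_to_string_alt
  rw [PySem.List.pyRange_one_eq_nil (by omega : size+1 ≤ -1),
      PySem.List.pyRange_one_eq_nil (by omega : size ≤ 0),
      PySem.List.pyRepeat_singleton, show (size+2).toNat = 0 from by omega]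
  rfl

-- ===== VERDICT (by name: the statement is the Claim_ definition above) =====
theorem goban_to_string_spec : Claim_equal_goban_to_string := by
  intro goban size _hdom hpre
  unfold Spec_goban_to_string
  rcases hpre with hneg | ⟨h0, hlen, hrows⟩
  · exact goban_to_string_eq_alt_neg goban size hneg
  · exact goban_to_string_eq_alt goban size h0 hlen hrows
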